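-- pv_equiv track=rewrite | github.com/SantoSimone/Advent-of-Code | 2017/day_24.py | get_all_builds
-- ===== SOURCE A (Python) =====
-- from typing import List, Dict
--
-- def get_all_builds(components: Dict[int, List[int]]) -> List[List[List[int]]]:
--     all_builds = []
--     q = [[[0, 0]]]
--     while q:
--         curr_bridge = q.pop()
--         curr = curr_bridge[-1]
--         all_builds.append(curr_bridge)
--
--         for next_pin in components[curr[1]]:
--             # Check that we didn't use the (next_pin, curr_pin) component yet
--             if [next_pin, curr[1]] in curr_bridge or [curr[1], next_pin] in curr_bridge:
--                 continue
--
--             q.append([*curr_bridge, [curr[1], next_pin]])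
--
--     return all_builds
-- ===== SOURCE B (Python) =====
-- def get_all_builds(components):
--     all_builds = []
--
--     def helper(curr_bridge):
--         all_builds.append(curr_bridge)
--         curr_pin = curr_bridge[-1][1]
--         # reversed() reproduces the LIFO order of a stack-based traversal
--         for next_pin in reversed(components[curr_pin]):
--             if [next_pin, curr_pin] in curr_bridge or [curr_pin, next_pin] in curr_bridge:
--                 continue
--             helper([*curr_bridge, [curr_pin, next_pin]])
--
--     helper([[0, 0]])
--     return all_builds
-- ===== Notes on version B (the rewrite author's own statement) =====
-- stated objective: alternative
-- what changed: Replaces A's explicit work-list loop (a LIFO stack of partial bridges popped and extended in place) by a recursive depth-first helper that emits the current bridge and recurses over the matching pins in reversed order, which reproduces the stack's exact output order.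
import Mathlib
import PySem

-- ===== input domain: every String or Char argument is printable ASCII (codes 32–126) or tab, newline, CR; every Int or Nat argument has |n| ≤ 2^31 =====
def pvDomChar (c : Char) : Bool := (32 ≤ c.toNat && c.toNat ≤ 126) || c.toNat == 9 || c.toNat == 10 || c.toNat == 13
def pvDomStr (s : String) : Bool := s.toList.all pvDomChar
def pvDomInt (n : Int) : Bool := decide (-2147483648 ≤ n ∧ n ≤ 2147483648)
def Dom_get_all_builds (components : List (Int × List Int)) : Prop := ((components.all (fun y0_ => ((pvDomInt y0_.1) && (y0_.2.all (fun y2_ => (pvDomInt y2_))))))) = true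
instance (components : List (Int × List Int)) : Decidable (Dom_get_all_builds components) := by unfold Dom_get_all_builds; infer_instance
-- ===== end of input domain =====

-- B replaces A's explicit LIFO work-list loop by a recursive depth-first helper
-- (children visited in reversed order), same return value; 'alternative' objective.


-- ===== PORT A =====
-- dict lookup components[k]; with Pre_ (distinct keys, k present) this is the Python dict lookup
def pvLook (components : List (Int × List Int)) (k : Int) : List Int :=
  (List.lookup k components).getD []

-- all [k, v] pairs listed by the dict; used only to compute a sufficient fuel bound
def bridgeEdges (components : List (Int × List Int)) : List (List Int) :=
  components.flatMap (fun kv => kv.2.map (fun v => [kv.1, v]))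

-- the while-loop of A; fuel only makes the loop total (never exhausted on valid states)
def getAllBuildsLoop (components : List (Int × List Int)) :
    Nat → List (List (List Int)) → List (List (List Int)) → List (List (List Int))
  | 0, _, acc => acc
  | fuel + 1, q, acc =>
    match PySem.List.pop? q (-1) with
    | none => acc
    | some (curr_bridge, q') =>
      let curr := (PySem.List.pyGet? curr_bridge (-1)).getD []   -- bridge is never empty
      let pin := (PySem.List.pyGet? curr 1).getD 0               -- curr is always a 2-list
      getAllBuildsLoop components fuel
        ((pvLook components pin).foldl
          (fun qq next_pin =>
            if [next_pin, pin] ∈ curr_bridge ∨ [pin, next_pin] ∈ curr_bridge then qq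
            else qq ++ [curr_bridge ++ [[pin, next_pin]]]) q')
        (acc ++ [curr_bridge])

def get_all_builds (components : List (Int × List Int)) : List (List (List Int)) :=
  let M := (bridgeEdges components).length
  getAllBuildsLoop components ((M + 2) ^ (M + 2)) [[[0, 0]]] []

-- ===== PORT B =====
-- the recursive helper of B; fuel only makes the recursion total (never exhausted on valid bridges)
def getAllBuildsHelper (components : List (Int × List Int)) :
    Nat → List (List Int) → List (List (List Int))
  | 0, curr_bridge => [curr_bridge]
  | fuel + 1, curr_bridge =>
    let curr_pin := (PySem.List.pyGet? ((PySem.List.pyGet? curr_bridge (-1)).getD []) 1).getD 0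
    curr_bridge :: (pvLook components curr_pin).reverse.flatMap
      (fun next_pin =>
        if [next_pin, curr_pin] ∈ curr_bridge ∨ [curr_pin, next_pin] ∈ curr_bridge then []
        else getAllBuildsHelper components fuel (curr_bridge ++ [[curr_pin, next_pin]]))

def get_all_builds_alt (components : List (Int × List Int)) : List (List (List Int)) :=
  getAllBuildsHelper components ((bridgeEdges components).length + 1) [[0, 0]]

-- ===== PRECONDITION & SPEC =====
-- one breadth-first expansion step of the pins reachable from pin 0 (plain graph reachability)
def pvReachStep (C : List (Int × List Int)) (s : List Int) : List Int :=
  PySem.Set.ofList (s ++ s.flatMap (fun k => (List.lookup k C).getD []))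

-- all pins the traversal ever looks up: the pins reachable from 0 (fixpoint after ≤ |C| steps)
def pvReach (C : List (Int × List Int)) : List Int :=
  (fun s => pvReachStep C s)^[C.length + 1] [0]

-- Pre_ excludes exactly the inputs on which A raises KeyError: those where some pin reachable from
-- pin 0 — i.e. looked up during the traversal — is not a key; the Nodup conjunct only rules out
-- duplicate keys, which a Python dict argument cannot carry (the association list merely encodes it).
def Pre_get_all_builds (components : List (Int × List Int)) : Prop :=
  (components.map Prod.fst).Nodup ∧
  ∀ p ∈ pvReach components, p ∈ components.map Prod.fst
instance (components : List (Int × List Int)) : Decidable (Pre_get_all_builds components) := by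
  unfold Pre_get_all_builds; infer_instance

def pvWitness_get_all_builds : (List (Int × List Int)) := [(0, [1]), (1, [0])]

def Spec_get_all_builds (components : List (Int × List Int)) (out : List (List (List Int))) : Prop := out = get_all_builds_alt components
instance (components : List (Int × List Int)) (out : List (List (List Int))) : Decidable (Spec_get_all_builds components out) := by unfold Spec_get_all_builds; infer_instance

-- ===== CLAIM (what is proved, stated in full; the proofs are below) =====
def Claim_equal_get_all_builds : Prop := ∀ (components : List (Int × List Int)), Dom_get_all_builds components → Pre_get_all_builds components → Spec_get_all_builds components (get_all_builds components)

-- ===== LEMMAS AND PROOFS =====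

-- pin read off the end of a bridge, exactly as both ports compute it
def pvPin (b : List (List Int)) : Int :=
  (PySem.List.pyGet? ((PySem.List.pyGet? b (-1)).getD []) 1).getD 0

theorem pvPin_fold (b : List (List Int)) :
    (PySem.List.pyGet? ((PySem.List.pyGet? b (-1)).getD []) 1).getD 0 = pvPin b := rfl

-- the pins that extend bridge b, in the order A's for-loop accepts them
def pvKidPins (C : List (Int × List Int)) (b : List (List Int)) : List Int :=
  (pvLook C (pvPin b)).filter
    (fun p => decide (¬([p, pvPin b] ∈ b ∨ [pvPin b, p] ∈ b)))

def pvChild (b : List (List Int)) (p : Int) : List (List Int) := b ++ [[pvPin b, p]]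

-- invariant of every bridge reachable from the seed
def pvValid (C : List (Int × List Int)) (b : List (List Int)) : Prop :=
  b.head? = some [0, 0] ∧ b.tail.Nodup ∧ ∀ e ∈ b.tail, e ∈ bridgeEdges C

-- canonical fuel and canonical DFS result
def pvF (C : List (Int × List Int)) (b : List (List Int)) : Nat :=
  (bridgeEdges C).length + 2 - b.length

def pvDfs (C : List (Int × List Int)) (b : List (List Int)) : List (List (List Int)) :=
  getAllBuildsHelper C (pvF C b) b

theorem pv_lookup_mem {k : Int} {vs : List Int} :
    ∀ {C : List (Int × List Int)}, List.lookup k C = some vs → (k, vs) ∈ C := by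
  intro C
  induction C with
  | nil => intro h; simp at h
  | cons hd tl ih =>
    intro h
    obtain ⟨k', v'⟩ := hd
    simp only [List.lookup] at h
    by_cases hk : k = k'
    · subst hk
      rw [beq_self_eq_true] at h
      simp at h
      simp [h]
    · have hbe : (k == k') = false := beq_false_of_ne hk
      rw [hbe] at h
      exact List.mem_cons_of_mem _ (ih h)

theorem pvLook_sub {C : List (Int × List Int)} {k p : Int} (hp : p ∈ pvLook C k) :
    [k, p] ∈ bridgeEdges C := by
  unfold pvLook at hp
  cases hlk : List.lookup k C with
  | none => rw [hlk] at hp; simp at hp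
  | some vs =>
    rw [hlk] at hp; simp at hp
    have hmem := pv_lookup_mem hlk
    unfold bridgeEdges
    exact List.mem_flatMap.mpr ⟨(k, vs), hmem, List.mem_map.mpr ⟨p, hp, rfl⟩⟩

theorem pv_le_sum {x : Nat} : ∀ {l : List Nat}, x ∈ l → x ≤ l.sum := by
  intro l
  induction l with
  | nil => intro h; simp at h
  | cons hd tl ih =>
    intro h
    simp only [List.sum_cons]
    rcases List.mem_cons.mp h with h | h
    · omega
    · have := ih h; omega

theorem pvLook_len_le (C : List (Int × List Int)) (k : Int) :
    (pvLook C k).length ≤ (bridgeEdges C).length := by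
  unfold pvLook
  cases hlk : List.lookup k C with
  | none => simp
  | some vs =>
    have hmem := pv_lookup_mem hlk
    simp only [Option.getD_some]
    unfold bridgeEdges
    rw [List.length_flatMap]
    have : vs.length ∈ C.map (fun kv => ((kv.2.map (fun v => [kv.1, v])).length)) :=
      List.mem_map.mpr ⟨(k, vs), hmem, by simp⟩
    simpa using pv_le_sum this

theorem pv_valid_len {C : List (Int × List Int)} {b : List (List Int)}
    (h : pvValid C b) : b.length ≤ (bridgeEdges C).length + 1 := by
  rcases h with ⟨h1, h2, h3⟩
  have hne : b ≠ [] := by intro hb; rw [hb] at h1; simp at h1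
  have htl : b.tail.length ≤ (bridgeEdges C).length := by
    have hsub : b.tail.toFinset ⊆ (bridgeEdges C).toFinset := by
      intro e he; rw [List.mem_toFinset] at he ⊢; exact h3 e he
    calc b.tail.length = b.tail.toFinset.card := (List.toFinset_card_of_nodup h2).symm
      _ ≤ (bridgeEdges C).toFinset.card := Finset.card_le_card hsub
      _ ≤ (bridgeEdges C).length := List.toFinset_card_le _
  have : b.length = b.tail.length + 1 := by
    cases b with | nil => simp at hne | cons x xs => simp
  omega

theorem pv_kid_len_le (C : List (Int × List Int)) (b : List (List Int)) :
    (pvKidPins C b).length ≤ (bridgeEdges C).length :=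
  le_trans (List.length_filter_le _ _) (pvLook_len_le C (pvPin b))

theorem pv_child_len (b : List (List Int)) (p : Int) :
    (pvChild b p).length = b.length + 1 := by simp [pvChild]

theorem pv_valid_child {C : List (Int × List Int)} {b : List (List Int)} {p : Int}
    (h : pvValid C b) (hp : p ∈ pvKidPins C b) : pvValid C (pvChild b p) := by
  obtain ⟨h1, h2, h3⟩ := h
  unfold pvKidPins at hp
  rw [List.mem_filter] at hp
  obtain ⟨hlk, hcond⟩ := hp
  simp only [decide_eq_true_eq] at hcond
  obtain ⟨x, xs, rfl⟩ : ∃ x xs, b = x :: xs := by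
    cases b with
    | nil => simp at h1
    | cons x xs => exact ⟨x, xs, rfl⟩
  have hnotin : [pvPin (x :: xs), p] ∉ xs := by
    intro hmem
    exact hcond (Or.inr (List.mem_cons_of_mem _ hmem))
  refine ⟨by simpa [pvChild] using h1, ?_, ?_⟩
  · simp only [pvChild, List.cons_append, List.tail_cons]
    rw [List.nodup_append]
    refine ⟨by simpa using h2, by simp, ?_⟩
    intro e he f hf
    have hf2 : f = [pvPin (x :: xs), p] := List.mem_singleton.mp hf
    subst hf2
    exact fun hef => hnotin (hef ▸ he)
  · intro e he
    simp only [pvChild, List.cons_append, List.tail_cons, List.mem_append,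
      List.mem_singleton] at he
    rcases he with he | he
    · exact h3 e (by simpa using he)
    · rw [he]; exact pvLook_sub hlk

-- loop-shape lemmas matching the two ports' bodies
theorem pv_stepA (l : List Int) (cond : Int → Prop) [DecidablePred cond]
    (g : Int → List (List Int)) :
    ∀ q : List (List (List Int)),
      l.foldl (fun qq p => if cond p then qq else qq ++ [g p]) q
        = q ++ (l.filter (fun p => decide (¬ cond p))).map g := by
  induction l with
  | nil => intro q; simp
  | cons hd tl ih =>
    intro q
    by_cases hc : cond hd <;> simp [hc, ih]

theorem pv_stepB (l : List Int) (cond : Int → Prop) [DecidablePred cond]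
    (g : Int → List (List (List Int))) :
    l.flatMap (fun p => if cond p then [] else g p)
      = (l.filter (fun p => decide (¬ cond p))).flatMap g := by
  induction l with
  | nil => simp
  | cons hd tl ih =>
    by_cases hc : cond hd <;> simp [hc, ih]

theorem pv_flatMap_congr {α β : Type} {l : List α} {f g : α → List β}
    (h : ∀ a ∈ l, f a = g a) : l.flatMap f = l.flatMap g := by
  induction l with
  | nil => simp
  | cons hd tl ih =>
    simp only [List.flatMap_cons]
    rw [h hd (by simp), ih (fun a ha => h a (List.mem_cons_of_mem _ ha))]

-- unfolding the B helper one step, phrased with pvKidPins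
theorem pv_helper_succ (C : List (Int × List Int)) (fuel : Nat) (b : List (List Int)) :
    getAllBuildsHelper C (fuel + 1) b
      = b :: (pvKidPins C b).reverse.flatMap
          (fun p => getAllBuildsHelper C fuel (pvChild b p)) := by
  simp only [getAllBuildsHelper, pvPin_fold]
  rw [pv_stepB ((pvLook C (pvPin b)).reverse)
        (fun p => [p, pvPin b] ∈ b ∨ [pvPin b, p] ∈ b)
        (fun p => getAllBuildsHelper C fuel (b ++ [[pvPin b, p]]))]
  rw [List.filter_reverse]
  rfl

theorem pv_helper_mono {C : List (Int × List Int)} :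
    ∀ (fuel : Nat) (b : List (List Int)), pvValid C b → pvF C b ≤ fuel →
      getAllBuildsHelper C fuel b = pvDfs C b := by
  intro fuel
  induction fuel with
  | zero =>
    intro b hv hf
    have := pv_valid_len hv
    unfold pvF at hf; omega
  | succ n ih =>
    intro b hv hf
    have hlen := pv_valid_len hv
    obtain ⟨m, hm⟩ : ∃ m, pvF C b = m + 1 := ⟨pvF C b - 1, by unfold pvF; omega⟩
    unfold pvDfs
    rw [hm, pv_helper_succ, pv_helper_succ]
    congr 1
    apply pv_flatMap_congr
    intro p hp
    rw [List.mem_reverse] at hp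
    have hvc := pv_valid_child hv hp
    have hFc : pvF C (pvChild b p) = m := by
      unfold pvF at hm ⊢; rw [pv_child_len]; omega
    rw [ih _ hvc (by omega)]
    unfold pvDfs
    rw [hFc]

theorem pv_dfs_unfold {C : List (Int × List Int)} {b : List (List Int)}
    (hv : pvValid C b) :
    pvDfs C b = b :: (pvKidPins C b).reverse.flatMap (fun p => pvDfs C (pvChild b p)) := by
  have hlen := pv_valid_len hv
  obtain ⟨m, hm⟩ : ∃ m, pvF C b = m + 1 := ⟨pvF C b - 1, by unfold pvF; omega⟩
  conv_lhs => rw [pvDfs, hm, pv_helper_succ]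
  congr 1
  apply pv_flatMap_congr
  intro p hp
  rw [List.mem_reverse] at hp
  have hFc : pvF C (pvChild b p) = m := by
    unfold pvF at hm ⊢; rw [pv_child_len]; omega
  rw [pv_helper_mono m (pvChild b p) (pv_valid_child hv hp) (by omega)]

theorem pv_helper_pos (C : List (Int × List Int)) (fuel : Nat) (b : List (List Int)) :
    1 ≤ (getAllBuildsHelper C fuel b).length := by
  cases fuel with
  | zero => simp [getAllBuildsHelper]
  | succ n => rw [pv_helper_succ]; simp

theorem pv_dfs_pos (C : List (Int × List Int)) (b : List (List Int)) :
    1 ≤ (pvDfs C b).length := pv_helper_pos C _ b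

theorem pv_flatMap_len_le {α β : Type} {l : List α} {f : α → List β} {c : Nat}
    (h : ∀ a ∈ l, (f a).length ≤ c) : (l.flatMap f).length ≤ l.length * c := by
  induction l with
  | nil => simp
  | cons hd tl ih =>
    simp only [List.flatMap_cons, List.length_append, List.length_cons]
    have h1 := h hd (by simp)
    have h2 := ih (fun a ha => h a (List.mem_cons_of_mem _ ha))
    calc (f hd).length + (tl.flatMap f).length ≤ c + tl.length * c := by omega
      _ = (tl.length + 1) * c := by ring

theorem pv_dfs_len {C : List (Int × List Int)} :
    ∀ (fuel : Nat) (b : List (List Int)), pvValid C b → pvF C b ≤ fuel →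
      (pvDfs C b).length ≤ ((bridgeEdges C).length + 2) ^ (pvF C b) := by
  intro fuel
  induction fuel with
  | zero =>
    intro b hv hf
    have := pv_valid_len hv
    unfold pvF at hf; omega
  | succ n ih =>
    intro b hv hf
    have hlen := pv_valid_len hv
    obtain ⟨m, hm⟩ : ∃ m, pvF C b = m + 1 := ⟨pvF C b - 1, by unfold pvF; omega⟩
    rw [pv_dfs_unfold hv, hm]
    have hb : ∀ p ∈ (pvKidPins C b).reverse,
        (pvDfs C (pvChild b p)).length ≤ ((bridgeEdges C).length + 2) ^ m := by
      intro p hp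
      rw [List.mem_reverse] at hp
      have hvc := pv_valid_child hv hp
      have hFc : pvF C (pvChild b p) = m := by
        unfold pvF at hm ⊢; rw [pv_child_len]; omega
      have := ih (pvChild b p) hvc (by omega)
      rwa [hFc] at this
    have hsub : ((pvKidPins C b).reverse.flatMap (fun p => pvDfs C (pvChild b p))).length
        ≤ (bridgeEdges C).length * ((bridgeEdges C).length + 2) ^ m := by
      calc ((pvKidPins C b).reverse.flatMap (fun p => pvDfs C (pvChild b p))).length
          ≤ (pvKidPins C b).reverse.length * ((bridgeEdges C).length + 2) ^ m :=
            pv_flatMap_len_le hb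
        _ ≤ (bridgeEdges C).length * ((bridgeEdges C).length + 2) ^ m := by
            have := pv_kid_len_le C b
            simp only [List.length_reverse]
            exact Nat.mul_le_mul_right _ this
    have hpow : 1 ≤ ((bridgeEdges C).length + 2) ^ m := Nat.one_le_pow _ _ (by omega)
    have hexp : ((bridgeEdges C).length + 2) ^ (m + 1)
        = ((bridgeEdges C).length + 2) ^ m * ((bridgeEdges C).length + 2) := by ring
    simp only [List.length_cons]
    rw [hexp]
    nlinarith [hsub, hpow]

-- the A-loop produces the concatenated DFS forests of the reversed stack
theorem pv_loopA {C : List (Int × List Int)} :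
    ∀ (fuel : Nat) (q acc : List (List (List Int))),
      (∀ b ∈ q, pvValid C b) →
      (q.map (fun b => (pvDfs C b).length)).sum ≤ fuel →
      getAllBuildsLoop C fuel q acc = acc ++ q.reverse.flatMap (pvDfs C) := by
  intro fuel
  induction fuel with
  | zero =>
    intro q acc hv hf
    cases q with
    | nil => simp [getAllBuildsLoop]
    | cons x xs =>
      exfalso
      have := pv_dfs_pos C x
      simp only [List.map_cons, List.sum_cons] at hf
      omega
  | succ n ih =>
    intro q acc hv hf
    rcases List.eq_nil_or_concat q with hq | ⟨q', b, hq⟩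
    · subst hq; simp [getAllBuildsLoop, PySem.List.pop?]
    · rw [List.concat_eq_append] at hq
      subst hq
      rw [getAllBuildsLoop, PySem.List.pop?_last]
      simp only [pvPin_fold]
      rw [pv_stepA (pvLook C (pvPin b))
            (fun p => [p, pvPin b] ∈ b ∨ [pvPin b, p] ∈ b)
            (fun p => b ++ [[pvPin b, p]]) q']
      have hvb : pvValid C b := hv b (by simp)
      have hkid : ((pvLook C (pvPin b)).filter
            (fun p => decide (¬([p, pvPin b] ∈ b ∨ [pvPin b, p] ∈ b)))).map
            (fun p => b ++ [[pvPin b, p]]) = (pvKidPins C b).map (pvChild b) := rfl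
      rw [hkid]
      have hunf := pv_dfs_unfold hvb
      have hsum_b : (pvDfs C b).length
          = 1 + ((pvKidPins C b).map (fun p => (pvDfs C (pvChild b p)).length)).sum := by
        rw [hunf]
        simp only [List.length_cons, List.length_flatMap, List.map_reverse,
          List.sum_reverse]
        omega
      rw [ih (q' ++ (pvKidPins C b).map (pvChild b)) (acc ++ [b]) ?hvnew ?hfnew]
      · rw [List.reverse_append, List.reverse_append]
        simp only [List.reverse_cons, List.reverse_nil, List.nil_append,
          List.flatMap_append, List.flatMap_cons, List.flatMap_nil, List.append_nil,
          ← List.map_reverse, List.flatMap_map]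
        rw [hunf]
        simp [List.append_assoc]
      case hvnew =>
        intro x hx
        rw [List.mem_append] at hx
        rcases hx with hx | hx
        · exact hv x (by simp [hx])
        · rw [List.mem_map] at hx
          obtain ⟨p, hp, rfl⟩ := hx
          exact pv_valid_child hvb hp
      case hfnew =>
        simp only [List.map_append, List.sum_append, List.map_map, List.map_cons,
          List.map_nil, List.sum_cons, List.sum_nil] at hf ⊢
        rw [hsum_b] at hf
        have hcomp : (List.map ((fun b0 => (pvDfs C b0).length) ∘ pvChild b)
              (pvKidPins C b)).sum
            = (List.map (fun p => (pvDfs C (pvChild b p)).length) (pvKidPins C b)).sum :=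
          rfl
        omega

-- ===== VERDICT (by name: the statement is the Claim_ definition above) =====
theorem get_all_builds_spec : Claim_equal_get_all_builds := by
  intro C hdom hpre
  unfold Spec_get_all_builds get_all_builds get_all_builds_alt
  have hvseed : pvValid C [[0, 0]] := ⟨rfl, by simp, by simp⟩
  have hFseed : pvF C [[0, 0]] = (bridgeEdges C).length + 1 := by
    unfold pvF; simp
  have hrhs : getAllBuildsHelper C ((bridgeEdges C).length + 1) [[0, 0]]
      = pvDfs C [[0, 0]] := by rw [pvDfs, hFseed]
  have hlen : (pvDfs C [[0, 0]]).length
      ≤ ((bridgeEdges C).length + 2) ^ ((bridgeEdges C).length + 1) := by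
    have := pv_dfs_len (C := C) (pvF C [[0, 0]]) [[0, 0]] hvseed le_rfl
    rwa [hFseed] at this
  have hfuel : (([[[0, 0]]] : List (List (List Int))).map
        (fun b => (pvDfs C b).length)).sum
      ≤ ((bridgeEdges C).length + 2) ^ ((bridgeEdges C).length + 2) := by
    simp only [List.map_cons, List.map_nil, List.sum_cons, List.sum_nil]
    have hp : ((bridgeEdges C).length + 2) ^ ((bridgeEdges C).length + 1)
        ≤ ((bridgeEdges C).length + 2) ^ ((bridgeEdges C).length + 2) :=
      Nat.pow_le_pow_right (by omega) (by omega)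
    omega
  have hval : ∀ b ∈ ([[[0, 0]]] : List (List (List Int))), pvValid C b := by
    intro b hb
    rw [List.mem_singleton] at hb
    rw [hb]; exact hvseed
  rw [pv_loopA (((bridgeEdges C).length + 2) ^ ((bridgeEdges C).length + 2))
      [[[0, 0]]] [] hval hfuel]
  simp [hrhs]
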